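/- GENERATED by farm/mkstatement.py from design/units.tsv (unit `free`) and the Specs of Vorbis/Spec/*.lean — do not edit.
   THE STATEMENT of the proof unit `free`: the function `free` (1 instructions) satisfies its contract,
   given the contracts of its callees. What the names mean: Vorbis/Spec/Basic.lean. The theorem to prove:
   `theorem free_ok : Vorbis.Spec.free.Statement`. -/
import Vorbis.Spec.LibcMisc
namespace Vorbis.Spec.free
open X86 X86.User Asan

/-- The statement of unit `free`. -/
def Statement : Prop :=
  ∀ (Lay : Layout) (_hLay : Lay.hi = 0x1000000) (μ : Microarch) (_hμ : UserX.MicroOK μ) (u₀ : State)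
    (_hcode : HasCodeNat Lay u₀ Vorbis.L.free.entry Vorbis.Code.code_free.nat Vorbis.L.free.size),
    ∀ (others : List Obj) (frames : List (Nat × FrameLayout)), Calls Lay μ Vorbis.WayInv (Vorbis.conv u₀) Vorbis.L.free.entry (Vorbis.Spec.free.spec others frames)

end Vorbis.Spec.free
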